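-- pv_equiv track=rewrite | github.com/hongminjoon/Freshman_repo | coding_test_python/1_26/59.py | solution
-- ===== SOURCE A (Python) =====
-- def solution(n, m, section):
--     answer = 1
--     temp = section[0]
--     for sec in section:
--         if sec > temp+m-1:
--             temp = sec
--             answer += 1
--
--     return answer
-- ===== SOURCE B (Python) =====
-- def solution(n, m, section):
--     # Backward dynamic programming over indices, with a monotonic stack of
--     # suffix records queried by binary search (instead of A's forward greedy sweep):
--     # g[i] = rollers needed when a roller has just been started at section[i],
--     # computed right-to-left; the stack holds the record elements of the suffix
--     # (value strictly greater than everything left of it within the suffix),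
--     # so "first index >= i exceeding a threshold" is a binary search on it.
--     L = len(section)
--     g = [0] * L
--     st = []  # (value, index); values strictly decreasing along the list
--
--     def first_exceeding(x):
--         # smallest index held by the stack whose value is > x, or None
--         lo, hi = 0, len(st)
--         while lo < hi:
--             mid = (lo + hi) // 2
--             if st[mid][0] > x:
--                 lo = mid + 1
--             else:
--                 hi = mid
--         return None if lo == 0 else st[lo - 1][1]
--
--     for i in range(L - 1, -1, -1):
--         v = section[i]
--         j = first_exceeding(v + m - 1)
--         g[i] = 1 if j is None else 1 + g[j]
--         while st and st[-1][0] <= v: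
--             st.pop()
--         st.append((v, i))
--
--     j0 = first_exceeding(section[0] + m - 1)
--     return 1 if j0 is None else 1 + g[j0]
-- ===== Notes on version B (the rewrite author's own statement) =====
-- stated objective: alternative
-- what changed: Replaced A's forward greedy sweep with a right-to-left dynamic programming pass: a monotonic stack of suffix records, queried by binary search, gives each index its next uncovered section, and g[i] counts rollers from index i; the answer is read off with one final stack query.
import Mathlib
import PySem

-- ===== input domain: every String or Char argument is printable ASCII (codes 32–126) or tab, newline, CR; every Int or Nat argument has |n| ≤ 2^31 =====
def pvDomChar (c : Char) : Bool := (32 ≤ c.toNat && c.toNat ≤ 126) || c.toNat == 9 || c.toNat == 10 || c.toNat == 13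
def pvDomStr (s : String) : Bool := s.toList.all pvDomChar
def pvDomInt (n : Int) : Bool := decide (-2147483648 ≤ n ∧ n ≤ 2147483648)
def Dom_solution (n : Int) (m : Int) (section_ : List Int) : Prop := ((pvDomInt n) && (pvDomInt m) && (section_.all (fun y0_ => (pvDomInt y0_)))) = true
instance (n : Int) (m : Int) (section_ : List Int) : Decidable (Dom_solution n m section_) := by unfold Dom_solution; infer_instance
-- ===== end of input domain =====

-- B replaces A's forward greedy sweep by a right-to-left DP with a monotonic stack
-- queried by binary search (objective: alternative algorithm, same return values).

-- ===== PORT A =====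
-- A's loop body: if sec > temp+m-1 then temp := sec, answer += 1
def solnStep (m : Int) (s : Int × Int) (sec : Int) : Int × Int :=
  if sec > s.2 + m - 1 then (s.1 + 1, sec) else s

def solution (n : Int) (m : Int) (section_ : List Int) : Int :=
  -- temp = section[0]: IndexError on [] (excluded by Pre_solution); .getD 0 is never used under Pre_
  let temp := (PySem.List.pyGet? section_ 0).getD 0
  (section_.foldl (solnStep m) (1, temp)).1

-- ===== PORT B =====
-- Source B's `first_exceeding`: binary-search loop `while lo < hi: …`
-- (fuel = a totality guard only: `hi - lo` halves each turn, so `st.length` fuel never runs out)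
def bsr (st : List (Int × Nat)) (x : Int) : Nat → Nat → Nat → Nat
  | 0, lo, _ => lo
  | fuel + 1, lo, hi =>
    if lo < hi then
      let mid := (lo + hi) / 2
      if (st.getD mid (0, 0)).1 > x then bsr st x fuel (mid + 1) hi else bsr st x fuel lo mid
    else lo

def firstExceeding (st : List (Int × Nat)) (x : Int) : Option Nat :=
  let lo := bsr st x st.length 0 st.length
  if lo = 0 then none else some (st.getD (lo - 1) (0, 0)).2

-- Source B's `while st and st[-1][0] <= v: st.pop()` (fuel = a totality guard only:
-- each turn pops one element, so `st.length` fuel never runs out)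
def popLE : Nat → List (Int × Nat) → Int → List (Int × Nat)
  | 0, st, _ => st
  | fuel + 1, st, v =>
    if h : st = [] then st
    else if (st.getLast h).1 ≤ v then popLE fuel st.dropLast v else st

-- one iteration of Source B's `for i in range(L-1, -1, -1)` body; state = (g, st)
def bstep (sec : List Int) (m : Int) (i : Nat) (s : List Int × List (Int × Nat)) :
    List Int × List (Int × Nat) :=
  let v := (PySem.List.pyGet? sec (Int.ofNat i)).getD 0
  let j := firstExceeding s.2 (v + m - 1)
  let g' := match j with
    | none => s.1.set i 1
    | some k => s.1.set i (1 + s.1.getD k 0)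
  (g', popLE s.2.length s.2 v ++ [(v, i)])

-- after `bpass sec m k`, the last k indices have been processed
def bpass (sec : List Int) (m : Int) : Nat → List Int × List (Int × Nat)
  | 0 => (List.replicate sec.length 0, [])
  | k + 1 => bstep sec m (sec.length - (k + 1)) (bpass sec m k)

def solution_alt (n : Int) (m : Int) (section_ : List Int) : Int :=
  let s := bpass section_ m section_.length
  -- final `first_exceeding(section[0] + m - 1)`; section[0] raises on [] (excluded by Pre_solution)
  let j0 := firstExceeding s.2 ((PySem.List.pyGet? section_ 0).getD 0 + m - 1)
  match j0 with
  | none => 1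
  | some k => 1 + s.1.getD k 0

-- ===== PRECONDITION & SPEC =====
-- Pre_ excludes only the empty list, on which both A and B raise IndexError at section[0].
def Pre_solution (n : Int) (m : Int) (section_ : List Int) : Prop := section_ ≠ []
instance (n : Int) (m : Int) (section_ : List Int) : Decidable (Pre_solution n m section_) := by
  unfold Pre_solution; infer_instance

def pvWitness_solution : Int × Int × List Int := (6, 4, [1, 4, 3, 4, 8])

def Spec_solution (n : Int) (m : Int) (section_ : List Int) (out : Int) : Prop := out = solution_alt n m section_
instance (n : Int) (m : Int) (section_ : List Int) (out : Int) : Decidable (Spec_solution n m section_ out) := by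
  unfold Spec_solution; infer_instance

-- ===== CLAIM (what is proved, stated in full; the proofs are below) =====
def Claim_equal_solution : Prop := ∀ (n : Int) (m : Int) (section_ : List Int), Dom_solution n m section_ → Pre_solution n m section_ → Spec_solution n m section_ (solution n m section_)

-- ===== LEMMAS AND PROOFS =====

-- reference: first index ≥ i whose element exceeds e (or sec.length)
def skipCov (sec : List Int) (e : Int) (i : Nat) : Nat :=
  if h : i < sec.length then
    if sec[i] ≤ e then skipCov sec e (i + 1) else i
  else i
termination_by sec.length - i

theorem skipCov_ge (sec : List Int) (e : Int) (i : Nat) : i ≤ skipCov sec e i := by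
  fun_induction skipCov with
  | case1 i h hle ih => exact Nat.le_of_succ_le ih
  | case2 i h hle => exact Nat.le_refl i
  | case3 i h => exact Nat.le_refl i

def jmp? (sec : List Int) (e : Int) (i : Nat) : Option Nat :=
  let k := skipCov sec e i
  if k < sec.length then some k else none

-- rollers used from index j on, when a roller was just started at section[j]
def chainCnt (sec : List Int) (m : Int) (j : Nat) : Int :=
  let k := skipCov sec (sec.getD j 0 + m - 1) (j + 1)
  if h : k < sec.length then 1 + chainCnt sec m k else 1
termination_by sec.length - j
decreasing_by
  have := skipCov_ge sec (sec.getD j 0 + m - 1) (j + 1); omega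

-- jump-chain reference loop for A's fold
def outerLoop (sec : List Int) (m : Int) (e : Int) (cnt : Int) (i : Nat) : Int :=
  if i < sec.length then
    let j := skipCov sec e i
    if h : j < sec.length then
      outerLoop sec m (sec[j] + m - 1) (cnt + 1) (j + 1)
    else cnt
  else cnt
termination_by sec.length - i
decreasing_by have := skipCov_ge sec e i; omega

theorem skipCov_drop (sec : List Int) (e : Int) (i : Nat) :
    sec.drop (skipCov sec e i) = (sec.drop i).dropWhile (fun x => decide (x ≤ e)) := by
  fun_induction skipCov with
  | case1 i h hle ih =>
      rw [List.drop_eq_getElem_cons h, List.dropWhile_cons]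
      simp [hle, ih]
  | case2 i h hle =>
      rw [List.drop_eq_getElem_cons h, List.dropWhile_cons]
      simp [hle]
  | case3 i h =>
      have : sec.length ≤ i := by omega
      simp [List.drop_eq_nil_of_le this]

theorem skipCov_le (sec : List Int) (e : Int) (i : Nat) (hi : i ≤ sec.length) :
    skipCov sec e i ≤ sec.length := by
  fun_induction skipCov with
  | case1 i h hle ih => exact ih (by omega)
  | case2 i h hle => omega
  | case3 i h => omega

theorem foldl_dropWhile_cov (m : Int) (l : List Int) (c t : Int) :
    l.foldl (solnStep m) (c, t) =
      (l.dropWhile (fun x => decide (x ≤ t + m - 1))).foldl (solnStep m) (c, t) := by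
  induction l with
  | nil => rfl
  | cons a l ih =>
      by_cases ha : a ≤ t + m - 1
      · have hstep : solnStep m (c, t) a = (c, t) := by
          simp [solnStep]; omega
        rw [List.dropWhile_cons, if_pos (by simpa using ha), List.foldl_cons, hstep]
        exact ih
      · rw [List.dropWhile_cons, if_neg (by simpa using ha)]

theorem dropWhile_head_false {α : Type} (p : α → Bool) (l : List α) (a : α) (l' : List α)
    (h : l.dropWhile p = a :: l') : p a = false := by
  induction l with
  | nil => simp at h
  | cons b l ih =>
      rw [List.dropWhile_cons] at h
      by_cases hb : p b
      · exact ih (by simpa [hb] using h)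
      · simp [hb] at h
        simp [h.1] at hb
        simpa using hb

theorem outerLoop_eq_foldl (sec : List Int) (m : Int) :
    ∀ (d i : Nat) (c t : Int), sec.length ≤ i + d →
      outerLoop sec m (t + m - 1) c i = ((sec.drop i).foldl (solnStep m) (c, t)).1 := by
  intro d
  induction d with
  | zero =>
      intro i c t hd
      have h1 : ¬ i < sec.length := by omega
      have h2 : sec.drop i = [] := List.drop_eq_nil_of_le (by omega)
      rw [outerLoop]
      simp [h1, h2]
  | succ d ih =>
      intro i c t hd
      by_cases hi : i < sec.length
      · set e := t + m - 1 with he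
        set j := skipCov sec e i with hj
        have hji : i ≤ j := skipCov_ge sec e i
        have hjl : j ≤ sec.length := skipCov_le sec e i (by omega)
        have hdrop : sec.drop j = (sec.drop i).dropWhile (fun x => decide (x ≤ e)) :=
          skipCov_drop sec e i
        have hfold : (sec.drop i).foldl (solnStep m) (c, t) = (sec.drop j).foldl (solnStep m) (c, t) := by
          rw [hdrop, he]
          exact foldl_dropWhile_cov m (sec.drop i) c t
        rw [outerLoop]
        by_cases hjlt : j < sec.length
        · have hcons : sec.drop j = sec[j] :: sec.drop (j + 1) := List.drop_eq_getElem_cons hjlt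
          have hgt : ¬ sec[j] ≤ e := by
            have := dropWhile_head_false (fun x => decide (x ≤ e)) (sec.drop i) sec[j] (sec.drop (j+1)) (by rw [← hdrop]; exact hcons)
            simpa using this.symm
          have hstep : solnStep m (c, t) sec[j] = (c + 1, sec[j]) := by
            simp [solnStep, he] at hgt ⊢; omega
          have hrec := ih (j + 1) (c + 1) sec[j] (by omega)
          simp only [hi, if_pos, ← hj, hjlt, dif_pos]
          rw [hrec, hfold, hcons, List.foldl_cons, hstep]
        · have hje : j = sec.length := by omega
          have hnil : sec.drop j = [] := by simp [hje]
          simp only [hi, if_pos, ← hj, hjlt]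
          rw [hfold, hnil]
          simp
      · have h2 : sec.drop i = [] := List.drop_eq_nil_of_le (by omega)
        rw [outerLoop]
        simp [hi, h2]

theorem outerLoop_eq_chain (sec : List Int) (m : Int) :
    ∀ (e cnt : Int) (i : Nat),
      outerLoop sec m e cnt i =
        cnt + (match jmp? sec e i with | none => 0 | some j => chainCnt sec m j) := by
  intro e cnt i
  fun_induction outerLoop with
  | case1 e cnt i h1 j h ih =>
      have hjlt : skipCov sec e i < sec.length := h
      rw [ih]
      have hj : jmp? sec e i = some (skipCov sec e i) := by unfold jmp?; simp [hjlt]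
      rw [hj]
      show _ = cnt + chainCnt sec m (skipCov sec e i)
      have hgd : sec.getD (skipCov sec e i) 0 = sec[skipCov sec e i] := by
        rw [List.getD_eq_getElem?_getD, List.getElem?_eq_getElem hjlt]; rfl
      by_cases hk : skipCov sec (sec[skipCov sec e i] + m - 1) (skipCov sec e i + 1) < sec.length
      · have hj2 : jmp? sec (sec[skipCov sec e i] + m - 1) (skipCov sec e i + 1) =
            some (skipCov sec (sec[skipCov sec e i] + m - 1) (skipCov sec e i + 1)) := by
          unfold jmp?; simp [hk]
        rw [hj2]
        show cnt + 1 + chainCnt sec m _ = _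
        conv_rhs => rw [chainCnt]
        simp only [hgd, dif_pos hk]
        ring
      · have hj2 : jmp? sec (sec[skipCov sec e i] + m - 1) (skipCov sec e i + 1) = none := by
          unfold jmp?; simp [hk]
        rw [hj2]
        show cnt + 1 + 0 = _
        conv_rhs => rw [chainCnt]
        simp only [hgd, dif_neg hk]
        ring
  | case2 e cnt i h1 j h =>
      have hjlt : ¬ skipCov sec e i < sec.length := h
      have hj : jmp? sec e i = none := by unfold jmp?; simp [hjlt]
      rw [hj]
      simp
  | case3 e cnt i h1 =>
      have hsk : skipCov sec e i = i := by rw [skipCov]; simp [h1]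
      have hj : jmp? sec e i = none := by unfold jmp?; rw [hsk]; simp [h1]
      rw [hj]
      simp

-- record stack of the suffix starting at i, as Source B maintains it
def recs (sec : List Int) (i : Nat) : List (Int × Nat) :=
  if h : i < sec.length then
    (recs sec (i + 1)).takeWhile (fun e => decide (sec.getD i 0 < e.1)) ++ [(sec.getD i 0, i)]
  else []
termination_by sec.length - i

theorem popLE_eq_takeWhile (fuel : Nat) (st : List (Int × Nat)) (v : Int)
    (hlen : st.length ≤ fuel) (hs : st.Pairwise (fun a b => b.1 < a.1)) :
    popLE fuel st v = st.takeWhile (fun e => decide (v < e.1)) := by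
  induction fuel generalizing st with
  | zero =>
      have hnil : st = [] := List.length_eq_zero_iff.mp (by omega)
      simp [hnil, popLE]
  | succ f ih =>
      rw [popLE]
      split_ifs with h hle
      · simp [h]
      · have hd : st.dropLast ++ [st.getLast h] = st := List.dropLast_append_getLast h
        have hsd : st.dropLast.Pairwise (fun a b => b.1 < a.1) :=
          hs.sublist (List.dropLast_sublist st)
        have hld : st.dropLast.length ≤ f := by
          have : 0 < st.length := List.length_pos_iff.mpr h
          simp only [List.length_dropLast]
          omega
        conv_rhs => rw [← hd]
        rw [List.takeWhile_append]
        have hp : (decide (v < (st.getLast h).1)) = false := by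
          simp only [decide_eq_false_iff_not]; omega
        by_cases hlen2 : (st.dropLast.takeWhile (fun e => decide (v < e.1))).length = st.dropLast.length
        · have heq : st.dropLast.takeWhile (fun e => decide (v < e.1)) = st.dropLast :=
            (List.takeWhile_prefix _).eq_of_length hlen2
          rw [if_pos hlen2, ih st.dropLast hld hsd, heq]
          simp [hp]
        · rw [if_neg hlen2, ih st.dropLast hld hsd]
      · have hd : st.dropLast ++ [st.getLast h] = st := List.dropLast_append_getLast h
        rw [(List.takeWhile_eq_self_iff).mpr]
        intro e he
        rw [← hd] at he hs
        rcases List.mem_append.mp he with h1 | h1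
        · have := (List.pairwise_append.mp hs).2.2 e h1 (st.getLast h) (by simp)
          simp only [decide_eq_true_eq]; omega
        · simp only [List.mem_singleton] at h1
          subst h1
          simp only [decide_eq_true_eq]; omega

theorem sorted_lt_iff (st : List (Int × Nat)) (x : Int)
    (hs : st.Pairwise (fun a b => b.1 < a.1)) :
    ∀ idx, (h : idx < st.length) →
      (x < st[idx].1 ↔ idx < (st.takeWhile (fun e => decide (x < e.1))).length) := by
  induction st with
  | nil => intro idx h; simp at h
  | cons a l ih =>
      intro idx h
      by_cases hp : (decide (x < a.1)) = true
      · rw [List.takeWhile_cons, if_pos hp]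
        match idx with
        | 0 => simpa using hp
        | Nat.succ k =>
            have := ih (List.Pairwise.of_cons hs) k (by simpa using h)
            simpa [Nat.succ_lt_succ_iff] using this
      · rw [List.takeWhile_cons, if_neg hp]
        simp only [List.length_nil, Nat.not_lt_zero, iff_false]
        match idx with
        | 0 => simpa using hp
        | Nat.succ k =>
            have hk : k < l.length := by simpa using h
            have hmem : l[k] ∈ l := List.getElem_mem hk
            have hlt : (l[k]).1 < a.1 := (List.pairwise_cons.mp hs).1 _ hmem
            simp only [List.getElem_cons_succ]
            simp only [decide_eq_true_eq] at hp ⊢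
            omega

theorem bsr_eq_aux (st : List (Int × Nat)) (x : Int)
    (hs : st.Pairwise (fun a b => b.1 < a.1)) :
    ∀ (d lo hi : Nat), hi - lo ≤ d →
      lo ≤ (st.takeWhile (fun e => decide (x < e.1))).length →
      (st.takeWhile (fun e => decide (x < e.1))).length ≤ hi →
      hi ≤ st.length → bsr st x d lo hi = (st.takeWhile (fun e => decide (x < e.1))).length := by
  intro d
  induction d with
  | zero =>
      intro lo hi hd h1 h2 h3
      rw [bsr]
      omega
  | succ d ihd =>
      intro lo hi hd h1 h2 h3
      by_cases hlh : lo < hi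
      · rw [bsr]
        rw [if_pos hlh]
        have hmid : (lo + hi) / 2 < st.length := by omega
        have hgetD : st.getD ((lo + hi) / 2) (0, 0) = st[(lo + hi) / 2] := by
          rw [List.getD_eq_getElem?_getD, List.getElem?_eq_getElem hmid]; rfl
        simp only [hgetD]
        have hiff := sorted_lt_iff st x hs ((lo + hi) / 2) hmid
        by_cases hc : st[(lo + hi) / 2].1 > x
        · rw [if_pos hc]
          have : (lo + hi) / 2 < (st.takeWhile (fun e => decide (x < e.1))).length := hiff.mp hc
          exact ihd ((lo + hi) / 2 + 1) hi (by omega) (by omega) h2 h3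
        · rw [if_neg hc]
          have : ¬ (lo + hi) / 2 < (st.takeWhile (fun e => decide (x < e.1))).length := by
            intro hcon; exact hc (hiff.mpr hcon)
          exact ihd lo ((lo + hi) / 2) (by omega) h1 (by omega) (by omega)
      · rw [bsr]
        rw [if_neg hlh]
        omega

theorem bsr_eq (st : List (Int × Nat)) (x : Int)
    (hs : st.Pairwise (fun a b => b.1 < a.1)) :
    bsr st x st.length 0 st.length = (st.takeWhile (fun e => decide (x < e.1))).length := by
  have hle : (st.takeWhile (fun e => decide (x < e.1))).length ≤ st.length :=
    (List.takeWhile_prefix _).length_le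
  exact bsr_eq_aux st x hs st.length 0 st.length (by omega) (by omega) hle (le_refl _)

theorem recs_sorted (sec : List Int) (i : Nat) :
    (recs sec i).Pairwise (fun a b => b.1 < a.1) := by
  fun_induction recs with
  | case1 i h ih =>
      rw [List.pairwise_append]
      refine ⟨ih.sublist (List.takeWhile_prefix _).sublist, by simp, ?_⟩
      intro a ha b hb
      simp only [List.mem_singleton] at hb
      subst hb
      have := List.mem_takeWhile_imp ha
      simpa using this
  | case2 i h => simp

theorem firstExceeding_char (st : List (Int × Nat)) (x : Int)
    (hs : st.Pairwise (fun a b => b.1 < a.1)) :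
    firstExceeding st x = ((st.takeWhile (fun e => decide (x < e.1))).getLast?).map (·.2) := by
  have hbsr := bsr_eq st x hs
  have hle : (st.takeWhile (fun e => decide (x < e.1))).length ≤ st.length :=
    (List.takeWhile_prefix _).length_le
  unfold firstExceeding
  rw [hbsr]
  by_cases ht : (st.takeWhile (fun e => decide (x < e.1))).length = 0
  · have hnil : st.takeWhile (fun e => decide (x < e.1)) = [] := List.length_eq_zero_iff.mp ht
    simp [hnil]
  · rw [if_neg ht]
    have h1 : (st.takeWhile (fun e => decide (x < e.1))).length - 1 < st.length := by omega
    have h2 : (st.takeWhile (fun e => decide (x < e.1))).length - 1 <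
        (st.takeWhile (fun e => decide (x < e.1))).length := by omega
    have hg : st.getD ((st.takeWhile (fun e => decide (x < e.1))).length - 1) (0, 0) =
        st[(st.takeWhile (fun e => decide (x < e.1))).length - 1] := by
      rw [List.getD_eq_getElem?_getD, List.getElem?_eq_getElem h1]; rfl
    have hgl : (st.takeWhile (fun e => decide (x < e.1))).getLast? =
        some ((st.takeWhile (fun e => decide (x < e.1)))[(st.takeWhile (fun e => decide (x < e.1))).length - 1]) := by
      rw [List.getLast?_eq_getElem?, List.getElem?_eq_getElem h2]
    have hgeq : (st.takeWhile (fun e => decide (x < e.1)))[(st.takeWhile (fun e => decide (x < e.1))).length - 1]'h2 =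
        st[(st.takeWhile (fun e => decide (x < e.1))).length - 1]'h1 :=
      (List.takeWhile_prefix _).getElem h2
    rw [hg, hgl, hgeq]
    rfl

theorem takeWhile_takeWhile_of_imp {α : Type} (p q : α → Bool)
    (himp : ∀ a, p a = true → q a = true) (l : List α) :
    (l.takeWhile q).takeWhile p = l.takeWhile p := by
  induction l with
  | nil => rfl
  | cons a l ih =>
      by_cases hq : q a = true
      · rw [List.takeWhile_cons, if_pos hq, List.takeWhile_cons, List.takeWhile_cons]
        by_cases hp : p a = true
        · rw [if_pos hp, if_pos hp, ih]
        · rw [if_neg hp, if_neg hp]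
      · rw [List.takeWhile_cons, if_neg hq]
        have hp : ¬ p a = true := fun hc => hq (himp a hc)
        rw [List.takeWhile_cons, if_neg hp]
        rfl

theorem recs_query (sec : List Int) (x : Int) (i : Nat) :
    (((recs sec i).takeWhile (fun e => decide (x < e.1))).getLast?).map (·.2) = jmp? sec x i := by
  fun_induction recs with
  | case1 i h ih =>
      have hv : sec.getD i 0 = sec[i] := by
        rw [List.getD_eq_getElem?_getD, List.getElem?_eq_getElem h]; rfl
      by_cases hx : x < sec.getD i 0
      · have hall : ∀ e ∈ ((recs sec (i + 1)).takeWhile (fun e => decide (sec.getD i 0 < e.1)) ++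
            [(sec.getD i 0, i)]), (decide (x < e.1)) = true := by
          intro e he
          rcases List.mem_append.mp he with h1 | h1
          · have := List.mem_takeWhile_imp h1
            simp only [decide_eq_true_eq] at this ⊢
            omega
          · simp only [List.mem_singleton] at h1
            subst h1
            simpa using hx
        rw [List.takeWhile_eq_self_iff.mpr hall, List.getLast?_concat]
        unfold jmp?
        rw [skipCov]
        have hnle : ¬ sec[i] ≤ x := by omega
        simp [h, hnle]
      · rw [List.takeWhile_append]
        have hsingle : List.takeWhile (fun e => decide (x < e.1)) [(sec.getD i 0, i)] = [] := by
          simp only [List.takeWhile_cons]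
          rw [if_neg (by simpa using hx)]
        have htwtw : (((recs sec (i + 1)).takeWhile (fun e => decide (sec.getD i 0 < e.1))).takeWhile
            (fun e => decide (x < e.1))) = (recs sec (i + 1)).takeWhile (fun e => decide (x < e.1)) :=
          takeWhile_takeWhile_of_imp _ _ (by intro a ha; simp only [decide_eq_true_eq] at ha ⊢; omega) _
        have hjmp : jmp? sec x i = jmp? sec x (i + 1) := by
          unfold jmp?
          rw [skipCov]
          have hle2 : sec[i] ≤ x := by omega
          simp [h, hle2]
        rw [hjmp]
        split_ifs with hlen
        · have heq : ((recs sec (i + 1)).takeWhile (fun e => decide (sec.getD i 0 < e.1))).takeWhile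
              (fun e => decide (x < e.1)) =
              (recs sec (i + 1)).takeWhile (fun e => decide (sec.getD i 0 < e.1)) :=
            (List.takeWhile_prefix _).eq_of_length hlen
          rw [hsingle, List.append_nil, ← heq, htwtw]
          exact ih
        · rw [htwtw]
          exact ih
  | case2 i h =>
      unfold jmp?
      rw [skipCov]
      simp [h]

theorem firstExceeding_recs (sec : List Int) (i : Nat) (x : Int) :
    firstExceeding (recs sec i) x = jmp? sec x i := by
  rw [firstExceeding_char _ _ (recs_sorted sec i), recs_query]

theorem bpass_inv (sec : List Int) (m : Int) (k : Nat) (hk : k ≤ sec.length) :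
    (bpass sec m k).2 = recs sec (sec.length - k) ∧
    (bpass sec m k).1.length = sec.length ∧
    ∀ j, sec.length - k ≤ j → j < sec.length →
      (bpass sec m k).1.getD j 0 = chainCnt sec m j := by
  induction k with
  | zero =>
      refine ⟨?_, by simp [bpass], ?_⟩
      · show ([] : List (Int × Nat)) = recs sec (sec.length - 0)
        rw [recs]
        simp
      · intro j hj1 hj2
        omega
  | succ k ih =>
      obtain ⟨hst, hlen, hg⟩ := ih (by omega)
      have hilt : sec.length - (k + 1) < sec.length := by omega
      have hsucc : sec.length - (k + 1) + 1 = sec.length - k := by omega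
      have hv : (PySem.List.pyGet? sec (Int.ofNat (sec.length - (k + 1)))).getD 0 =
          sec.getD (sec.length - (k + 1)) 0 := by
        simp [PySem.List.pyGet?_natCast, List.getD_eq_getElem?_getD]
      have hb : bpass sec m (k + 1) = bstep sec m (sec.length - (k + 1)) (bpass sec m k) := rfl
      rw [hb]
      unfold bstep
      simp only [hv, hst]
      rw [firstExceeding_recs sec (sec.length - k) (sec.getD (sec.length - (k + 1)) 0 + m - 1)]
      have hrec : popLE (recs sec (sec.length - k)).length (recs sec (sec.length - k))
          (sec.getD (sec.length - (k + 1)) 0) ++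
          [(sec.getD (sec.length - (k + 1)) 0, sec.length - (k + 1))] =
          recs sec (sec.length - (k + 1)) := by
        conv_rhs => rw [recs]
        rw [dif_pos hilt, hsucc,
          popLE_eq_takeWhile _ _ _ (le_refl _) (recs_sorted sec (sec.length - k))]
      have hcc : ∀ (val : Int),
          (jmp? sec (sec.getD (sec.length - (k + 1)) 0 + m - 1) (sec.length - k) = none →
            val = 1) →
          (∀ kk, jmp? sec (sec.getD (sec.length - (k + 1)) 0 + m - 1) (sec.length - k) = some kk →
            val = 1 + chainCnt sec m kk) →
          val = chainCnt sec m (sec.length - (k + 1)) := by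
        intro val hnone hsome
        rw [chainCnt, hsucc]
        by_cases hk2 : skipCov sec (sec.getD (sec.length - (k + 1)) 0 + m - 1)
            (sec.length - k) < sec.length
        · rw [dif_pos hk2]
          exact hsome _ (by unfold jmp?; rw [if_pos hk2])
        · rw [dif_neg hk2]
          exact hnone (by unfold jmp?; rw [if_neg hk2])
      have hgetset : ∀ (val : Int) (j : Nat), j < sec.length →
          ((bpass sec m k).1.set (sec.length - (k + 1)) val).getD j 0 =
          if sec.length - (k + 1) = j then val else (bpass sec m k).1.getD j 0 := by
        intro val j hj2
        rw [List.getD_eq_getElem?_getD, List.getElem?_set, hlen]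
        split_ifs with h1
        · subst h1
          simp
        · rw [List.getD_eq_getElem?_getD]
      cases hj : jmp? sec (sec.getD (sec.length - (k + 1)) 0 + m - 1) (sec.length - k) with
      | none =>
          refine ⟨by simpa using hrec, by simp [List.length_set, hlen], ?_⟩
          intro j hj1 hj2
          simp only
          rw [hgetset 1 j hj2]
          split_ifs with h1
          · subst h1
            exact hcc 1 (fun _ => rfl) (fun kk hkk => by rw [hj] at hkk; cases hkk)
          · exact hg j (by omega) hj2
      | some kk =>
          refine ⟨by simpa using hrec, by simp [List.length_set, hlen], ?_⟩
          intro j hj1 hj2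
          simp only
          rw [hgetset _ j hj2]
          split_ifs with h1
          · have hkk : kk = skipCov sec (sec.getD (sec.length - (k + 1)) 0 + m - 1)
                (sec.length - k) ∧ kk < sec.length := by
              by_cases hx : skipCov sec (sec.getD (sec.length - (k + 1)) 0 + m - 1)
                  (sec.length - k) < sec.length
              · have heq : jmp? sec (sec.getD (sec.length - (k + 1)) 0 + m - 1) (sec.length - k) =
                    some (skipCov sec (sec.getD (sec.length - (k + 1)) 0 + m - 1) (sec.length - k)) := by
                  unfold jmp?; rw [if_pos hx]
                rw [heq] at hj
                injection hj with hj'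
                exact ⟨hj'.symm, hj' ▸ hx⟩
              · have heq : jmp? sec (sec.getD (sec.length - (k + 1)) 0 + m - 1) (sec.length - k) =
                    none := by
                  unfold jmp?; rw [if_neg hx]
                rw [heq] at hj
                cases hj
            obtain ⟨hkkdef, hkklt⟩ := hkk
            have hkkge : sec.length - k ≤ kk := by
              rw [hkkdef]; exact skipCov_ge _ _ _
            rw [hg kk hkkge hkklt]
            subst h1
            exact hcc (1 + chainCnt sec m kk) (fun hn => by rw [hn] at hj; cases hj)
              (fun kk2 hkk2 => by rw [hj] at hkk2; injection hkk2 with h2; rw [h2])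
          · exact hg j (by omega) hj2

-- ===== VERDICT (by name: the statement is the Claim_ definition above) =====
theorem solution_spec : Claim_equal_solution := by
  intro n m sec _ hpre
  unfold Spec_solution
  obtain ⟨a, l, rfl⟩ : ∃ a l, sec = a :: l := by
    cases sec with
    | nil => exact absurd rfl hpre
    | cons a l => exact ⟨a, l, rfl⟩
  have hget : (PySem.List.pyGet? (a :: l) 0).getD 0 = a := by
    simp [PySem.List.pyGet?, PySem.List.pyIdx?]
  have hA : solution n m (a :: l) = outerLoop (a :: l) m (a + m - 1) 1 0 := by
    unfold solution
    rw [hget]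
    have hfold := outerLoop_eq_foldl (a :: l) m (a :: l).length 0 1 a (by omega)
    rw [hfold]
    simp
  rw [hA, outerLoop_eq_chain]
  simp only [solution_alt]
  obtain ⟨hst, hlen, hg⟩ := bpass_inv (a :: l) m (a :: l).length (le_refl _)
  rw [Nat.sub_self] at hst hg
  rw [hget, hst, firstExceeding_recs]
  cases hj : jmp? (a :: l) (a + m - 1) 0 with
  | none => simp
  | some kk =>
      have hkklt : kk < (a :: l).length := by
        by_cases hx : skipCov (a :: l) (a + m - 1) 0 < (a :: l).length
        · have heq : jmp? (a :: l) (a + m - 1) 0 =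
              some (skipCov (a :: l) (a + m - 1) 0) := by
            unfold jmp?; rw [if_pos hx]
          rw [heq] at hj
          injection hj with hj'
          exact hj' ▸ hx
        · have heq : jmp? (a :: l) (a + m - 1) 0 = none := by
            unfold jmp?; rw [if_neg hx]
          rw [heq] at hj
          cases hj
      show 1 + chainCnt (a :: l) m kk = 1 + (bpass (a :: l) m (a :: l).length).1.getD kk 0
      rw [hg kk (Nat.zero_le kk) hkklt]
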